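-- pv_equiv track=rewrite | github.com/SpookyJelly/SSAFY_daily_works | TIL/algorism/0218/4861_회문.py | Pen
-- ===== SOURCE A (Python) =====
-- def Pen(lst,M)->list:
--     i = 0
--     # 해당 while문은 회문을 판단할 부분, 그러니까 M 크기로 썰어놓은 list를 계속 수정하는 것이다.
--     # 회문 판단할 문자열의 길이는 M이 되도록 유지하고, 매 루프마다 그 시작점이 1씩 이동하게 한다.
--     # 또한 리스트의 끝 문자열인 i+M의 크기는 파라미터인 lst의 길이를 넘지 않도록 한다.
--     while i+M <= len(lst):
--         orgin = list(lst)[i:i+M]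
--         sample = list(lst)[i:i+M]
--         N = len(orgin)
--         for idx in range(N//2):
--             sample[idx], sample[N - 1 - idx] = sample[N - 1 - idx], sample[idx]
--         if orgin == sample:
--             return sample
--         i+=1
-- ===== SOURCE B (Python) =====
-- def Pen(lst, M) -> list:
--     # Center expansion: a length-M window is a palindrome iff the characters
--     # around its center match pairwise out to radius M//2.  Scan the centers
--     # left to right, expanding outward from each; the first center that
--     # expands to the full radius gives the leftmost palindromic window.
--     n = len(lst)
--     if M > n:
--         return None
--     if M <= 0:
--         return []          # an empty window is trivially a palindrome
--     half = M // 2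
--     if M % 2:
--         for c in range(half, n - half):
--             r = 0
--             while r < half and lst[c - 1 - r] == lst[c + 1 + r]:
--                 r += 1
--             if r == half:
--                 return list(lst[c - half:c + half + 1])
--     else:
--         for g in range(half, n - half + 1):
--             r = 0
--             while r < half and lst[g - 1 - r] == lst[g + r]:
--                 r += 1
--             if r == half:
--                 return list(lst[g - half:g + half])
--     return None
-- ===== Notes on version B (the rewrite author's own statement) =====
-- stated objective: alternative
-- what changed: A slides a length-M window forward, copies it and reverses the copy by an index-swap loop to test palindromicity; B splits on the parity of M and scans palindrome CENTERS, expanding outward in mirrored character pairs until radius M//2, returning the first fully-expanding center's window. Pre_ excludes negative M (outside the natural domain of a window length), where A's negative slice stop wraps around and tests windows of varying length.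
-- outside the precondition, e.g. on Pen(' cabbba ', -3): A returns ['a', 'b', 'b', 'b', 'a'], B returns []
import Mathlib
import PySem

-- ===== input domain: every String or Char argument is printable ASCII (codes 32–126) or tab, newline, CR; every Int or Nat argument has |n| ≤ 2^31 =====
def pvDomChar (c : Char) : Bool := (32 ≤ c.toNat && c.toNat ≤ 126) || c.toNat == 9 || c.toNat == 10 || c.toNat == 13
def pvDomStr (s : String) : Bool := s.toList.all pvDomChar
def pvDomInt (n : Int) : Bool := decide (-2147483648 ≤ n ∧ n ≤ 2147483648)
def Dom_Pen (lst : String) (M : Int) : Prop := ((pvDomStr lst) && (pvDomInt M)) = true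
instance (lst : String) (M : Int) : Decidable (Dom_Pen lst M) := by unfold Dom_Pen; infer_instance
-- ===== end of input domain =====

-- B replaces A's slide-window / copy-and-reverse scan by center expansion: it walks the
-- palindrome centers (split by the parity of M) and expands outward in mirrored character
-- pairs; objective: alternative (same asymptotic cost, different algorithm).


-- list("x") = ['x']: a one-character Python string
def pvSing (c : Char) : String := String.ofList [c]

-- ===== PORT A =====
-- the while loop of A; xs = list(lst) (one-char strings), n = len(lst)
def PenLoop (xs : List String) (n M i : Int) : Option (List String) :=
  if _h : i + M ≤ n then
    let orgin := PySem.List.slice xs (some i) (some (i + M))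
    let sample0 := PySem.List.slice xs (some i) (some (i + M))
    let N : Int := (sample0.length : Int)
    -- for idx in range(N//2): parallel-assignment swap; idx and N-1-idx are
    -- nonnegative in-range indices here, so getD/set at .toNat are exact
    let sample := (PySem.List.pyRange 0 (PySem.Int.floordiv N 2) 1).foldl
      (fun s idx =>
        let a := PySem.List.pyGetD s (N - 1 - idx) ""
        let b := PySem.List.pyGetD s idx ""
        (s.set idx.toNat a).set (N - 1 - idx).toNat b) sample0
    if orgin = sample then some sample else PenLoop xs n M (i + 1)
  else none
termination_by (n - M - i + 1).toNat
decreasing_by omega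

def Pen (lst : String) (M : Int) : Option (List String) :=
  PenLoop (lst.toList.map pvSing) (PySem.Str.len lst) M 0

-- ===== PORT B =====
-- while r < half and lst[c-1-r] == lst[c+1+r]: r += 1   (odd M; the loop keeps
-- both indices nonnegative and in range, so pyGetD with a dummy default is exact)
def penExpandOdd (cs : List Char) (c half r : Int) : Int :=
  if _h : r < half ∧ PySem.List.pyGetD cs (c - 1 - r) ' ' = PySem.List.pyGetD cs (c + 1 + r) ' ' then
    penExpandOdd cs c half (r + 1)
  else r
termination_by (half - r).toNat
decreasing_by omega

-- for c in range(half, n - half): expand; on full expansion return the window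
def penFindOdd (cs : List Char) (stop half c : Int) : Option (List String) :=
  if _h : c < stop then
    if penExpandOdd cs c half 0 = half then
      some ((PySem.List.slice cs (some (c - half)) (some (c + half + 1))).map pvSing)
    else penFindOdd cs stop half (c + 1)
  else none
termination_by (stop - c).toNat
decreasing_by omega

-- while r < half and lst[g-1-r] == lst[g+r]: r += 1   (even M; indices in range)
def penExpandEven (cs : List Char) (g half r : Int) : Int :=
  if _h : r < half ∧ PySem.List.pyGetD cs (g - 1 - r) ' ' = PySem.List.pyGetD cs (g + r) ' ' then
    penExpandEven cs g half (r + 1)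
  else r
termination_by (half - r).toNat
decreasing_by omega

-- for g in range(half, n - half + 1): expand; on full expansion return the window
def penFindEven (cs : List Char) (stop half g : Int) : Option (List String) :=
  if _h : g < stop then
    if penExpandEven cs g half 0 = half then
      some ((PySem.List.slice cs (some (g - half)) (some (g + half))).map pvSing)
    else penFindEven cs stop half (g + 1)
  else none
termination_by (stop - g).toNat
decreasing_by omega

def Pen_alt (lst : String) (M : Int) : Option (List String) :=
  let cs := lst.toList
  let n := PySem.Str.len lst
  if n < M then none
  else if M ≤ 0 then some []
  else
    let half := PySem.Int.floordiv M 2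
    if PySem.Int.mod M 2 ≠ 0 then penFindOdd cs (n - half) half half
    else penFindEven cs (n - half + 1) half half

-- ===== PRECONDITION & SPEC =====
-- Pre_ excludes negative M — outside the natural domain of a window length — where A's
-- slice stop i+M is a negative index and wraps around, yielding windows of varying length.
def Pre_Pen (lst : String) (M : Int) : Prop := 0 ≤ M
instance (lst : String) (M : Int) : Decidable (Pre_Pen lst M) := by unfold Pre_Pen; infer_instance
def pvWitness_Pen : String × Int := ("abcba", 3)

def Spec_Pen (lst : String) (M : Int) (out : Option (List String)) : Prop := out = Pen_alt lst M
instance (lst : String) (M : Int) (out : Option (List String)) : Decidable (Spec_Pen lst M out) := by unfold Spec_Pen; infer_instance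

-- ===== CLAIM (what is proved, stated in full; the proofs are below) =====
def Claim_equal_Pen : Prop := ∀ (lst : String) (M : Int), Dom_Pen lst M → Pre_Pen lst M → Spec_Pen lst M (Pen lst M)

-- ===== LEMMAS AND PROOFS =====

theorem pvSing_inj : Function.Injective pvSing := by
  intro a b h
  have := congrArg String.toList h
  simpa [pvSing] using this

theorem slice_map {α β : Type} (f : α → β) (xs : List α) (a? b? : Option Int) :
    PySem.List.slice (xs.map f) a? b? = (PySem.List.slice xs a? b?).map f := by
  cases a? <;> cases b? <;>
    simp [PySem.List.slice, PySem.List.clampIdx, List.map_drop, List.map_take]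

-- the swap loop reverses the list
theorem swap_reverse {α : Type} [Inhabited α] (l : List α) (d : α) :
    (PySem.List.pyRange 0 (PySem.Int.floordiv (l.length : Int) 2) 1).foldl
      (fun s idx =>
        (s.set idx.toNat (PySem.List.pyGetD s ((l.length : Int) - 1 - idx) d)).set
          ((l.length : Int) - 1 - idx).toNat (PySem.List.pyGetD s idx d)) l
    = l.reverse := by
  have hfd : PySem.Int.floordiv (l.length : Int) 2 = ((l.length / 2 : Nat) : Int) := by
    unfold PySem.Int.floordiv
    rw [Int.fdiv_eq_ediv]
    have h2 : (0:Int) ≤ 2 ∨ (2:Int) ∣ (l.length : Int) := Or.inl (by norm_num)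
    rw [if_pos h2]
    omega
  rw [hfd, PySem.List.pyRange_zero_nat, List.foldl_map]
  have hfun : ∀ (s : List α) (idx : Nat), idx ∈ List.range (l.length / 2) →
      ((s.set ((idx : Int)).toNat (PySem.List.pyGetD s ((l.length : Int) - 1 - (idx : Int)) d)).set
        (((l.length : Int) - 1 - (idx : Int))).toNat (PySem.List.pyGetD s ((idx : Int)) d)) =
      ((s.set idx (s.getD (l.length - 1 - idx) d)).set (l.length - 1 - idx) (s.getD idx d)) := by
    intro s idx hidx
    rw [List.mem_range] at hidx
    have hcast : ((l.length : Int) - 1 - (idx : Int)) = ((l.length - 1 - idx : Nat) : Int) := by omega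
    rw [hcast, PySem.List.pyGetD_natCast, PySem.List.pyGetD_natCast, Int.toNat_natCast, Int.toNat_natCast]
  rw [PySem.List.foldl_congr_mem (List.range (l.length / 2))
    (fun (s : List α) (idx : Nat) =>
      (s.set ((idx : Int)).toNat (PySem.List.pyGetD s ((l.length : Int) - 1 - (idx : Int)) d)).set
        (((l.length : Int) - 1 - (idx : Int))).toNat (PySem.List.pyGetD s ((idx : Int)) d))
    (fun s idx => (s.set idx (s.getD (l.length - 1 - idx) d)).set (l.length - 1 - idx) (s.getD idx d))
    l hfun]
  have key : ∀ k : Nat, k ≤ l.length / 2 →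
      ((List.range k).foldl (fun s idx =>
        (s.set idx (s.getD (l.length - 1 - idx) d)).set (l.length - 1 - idx) (s.getD idx d)) l).length = l.length ∧
      ∀ j, j < l.length → ((List.range k).foldl (fun s idx =>
        (s.set idx (s.getD (l.length - 1 - idx) d)).set (l.length - 1 - idx) (s.getD idx d)) l)[j]? =
        if j < k ∨ l.length - k ≤ j then l[l.length - 1 - j]? else l[j]? := by
    intro k
    induction k with
    | zero =>
      intro _
      refine ⟨rfl, fun j hj => ?_⟩
      rw [if_neg (by omega)]
      simp
    | succ k ih =>
      intro hk
      have hk' : k ≤ l.length / 2 := by omega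
      have hn : 2 * (k + 1) ≤ l.length := by omega
      obtain ⟨ihl, ihg⟩ := ih hk'
      rw [List.range_succ, List.foldl_append, List.foldl_cons, List.foldl_nil]
      have h1n : l.length - 1 - k < l.length := by omega
      have h2n : k < l.length := by omega
      have e1 : l[l.length - 1 - k]? = some (l[l.length - 1 - k]'h1n) := List.getElem?_eq_getElem h1n
      have e2 : l[k]? = some (l[k]'h2n) := List.getElem?_eq_getElem h2n
      have hv1 : ((List.range k).foldl (fun s idx =>
          (s.set idx (s.getD (l.length - 1 - idx) d)).set (l.length - 1 - idx) (s.getD idx d)) l).getD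
            (l.length - 1 - k) d = l[l.length - 1 - k]'h1n := by
        rw [List.getD_eq_getElem?_getD, ihg (l.length - 1 - k) h1n, if_neg (by omega), e1]
        rfl
      have hv2 : ((List.range k).foldl (fun s idx =>
          (s.set idx (s.getD (l.length - 1 - idx) d)).set (l.length - 1 - idx) (s.getD idx d)) l).getD
            k d = l[k]'h2n := by
        rw [List.getD_eq_getElem?_getD, ihg k h2n, if_neg (by omega), e2]
        rfl
      rw [hv1, hv2]
      refine ⟨by rw [List.length_set, List.length_set, ihl], fun j hj => ?_⟩
      rw [List.getElem?_set, List.getElem?_set, List.length_set, ihl]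
      by_cases hj1 : l.length - 1 - k = j
      · have hc2 : j < k + 1 ∨ l.length - (k + 1) ≤ j := by omega
        rw [if_pos hj1, if_pos h1n, if_pos hc2]
        have hidx : l.length - 1 - j = k := by omega
        rw [hidx, e2]
      · rw [if_neg hj1]
        by_cases hj2 : k = j
        · have hc2 : j < k + 1 ∨ l.length - (k + 1) ≤ j := by omega
          rw [if_pos hj2, if_pos h2n, if_pos hc2]
          have hidx : l.length - 1 - j = l.length - 1 - k := by omega
          rw [hidx, e1]
        · rw [if_neg hj2, ihg j hj]
          by_cases hc : j < k ∨ l.length - k ≤ j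
          · have hc2 : j < k + 1 ∨ l.length - (k + 1) ≤ j := by omega
            rw [if_pos hc, if_pos hc2]
          · have hc2 : ¬ (j < k + 1 ∨ l.length - (k + 1) ≤ j) := by omega
            rw [if_neg hc, if_neg hc2]
  obtain ⟨hl, hg⟩ := key (l.length / 2) le_rfl
  apply List.ext_getElem?
  intro j
  by_cases hj : j < l.length
  · rw [hg j hj, List.getElem?_reverse hj]
    by_cases hc : j < l.length / 2 ∨ l.length - l.length / 2 ≤ j
    · rw [if_pos hc]
    · rw [if_neg hc]
      congr 1
      omega
  · have h1 : l.reverse[j]? = none := by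
      rw [List.getElem?_eq_none_iff, List.length_reverse]
      omega
    have h2 : ((List.range (l.length / 2)).foldl (fun s idx =>
        (s.set idx (s.getD (l.length - 1 - idx) d)).set (l.length - 1 - idx) (s.getD idx d)) l)[j]? = none := by
      rw [List.getElem?_eq_none_iff, hl]
      omega
    rw [h1, h2]

theorem PenLoop_char (xs : List String) (n M : Int) : ∀ i,
    PenLoop xs n M i =
      ((PySem.List.pyRange i (n - M + 1) 1).find?
        (fun j => decide (PySem.List.slice xs (some j) (some (j + M)) =
          (PySem.List.slice xs (some j) (some (j + M))).reverse))).map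
        (fun j => PySem.List.slice xs (some j) (some (j + M))) := by
  have H : ∀ (fuel : Nat) (i : Int), (n - M + 1 - i).toNat ≤ fuel →
      PenLoop xs n M i =
        ((PySem.List.pyRange i (n - M + 1) 1).find?
          (fun j => decide (PySem.List.slice xs (some j) (some (j + M)) =
            (PySem.List.slice xs (some j) (some (j + M))).reverse))).map
          (fun j => PySem.List.slice xs (some j) (some (j + M))) := by
    intro fuel
    induction fuel with
    | zero =>
      intro i hle
      have hnot : ¬ (i + M ≤ n) := by omega
      rw [PenLoop, dif_neg hnot, PySem.List.pyRange_one_eq_nil (by omega)]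
      rfl
    | succ fuel ih =>
      intro i hle
      by_cases h : i + M ≤ n
      · rw [PenLoop, dif_pos h]
        simp only [swap_reverse]
        rw [PySem.List.pyRange_one_cons (show i < n - M + 1 by omega), List.find?_cons]
        by_cases hp : PySem.List.slice xs (some i) (some (i + M)) =
            (PySem.List.slice xs (some i) (some (i + M))).reverse
        · have hd : (decide (PySem.List.slice xs (some i) (some (i + M)) =
              (PySem.List.slice xs (some i) (some (i + M))).reverse)) = true := decide_eq_true hp
          rw [if_pos hp, hd]
          simp [← hp]
        · have hd : (decide (PySem.List.slice xs (some i) (some (i + M)) =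
              (PySem.List.slice xs (some i) (some (i + M))).reverse)) = false := decide_eq_false hp
          rw [if_neg hp, hd]
          simpa using ih (i + 1) (by omega)
      · have hnot : ¬ (i + M ≤ n) := h
        rw [PenLoop, dif_neg hnot, PySem.List.pyRange_one_eq_nil (by omega)]
        rfl
  intro i
  exact H ((n - M + 1 - i).toNat) i le_rfl

-- B's search loops as find? over the center range
theorem penFindOdd_char (cs : List Char) (stop half : Int) : ∀ c,
    penFindOdd cs stop half c =
      ((PySem.List.pyRange c stop 1).find?
        (fun x => decide (penExpandOdd cs x half 0 = half))).map
        (fun x => (PySem.List.slice cs (some (x - half)) (some (x + half + 1))).map pvSing) := by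
  have H : ∀ (fuel : Nat) (c : Int), (stop - c).toNat ≤ fuel →
      penFindOdd cs stop half c =
        ((PySem.List.pyRange c stop 1).find?
          (fun x => decide (penExpandOdd cs x half 0 = half))).map
          (fun x => (PySem.List.slice cs (some (x - half)) (some (x + half + 1))).map pvSing) := by
    intro fuel
    induction fuel with
    | zero =>
      intro c hle
      rw [penFindOdd, dif_neg (by omega), PySem.List.pyRange_one_eq_nil (by omega)]
      rfl
    | succ fuel ih =>
      intro c hle
      by_cases h : c < stop
      · rw [penFindOdd, dif_pos h, PySem.List.pyRange_one_cons h, List.find?_cons]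
        by_cases hp : penExpandOdd cs c half 0 = half
        · rw [if_pos hp, decide_eq_true hp]
          rfl
        · rw [if_neg hp, decide_eq_false hp]
          exact ih (c + 1) (by omega)
      · rw [penFindOdd, dif_neg h, PySem.List.pyRange_one_eq_nil (by omega)]
        rfl
  intro c
  exact H ((stop - c).toNat) c le_rfl

theorem penFindEven_char (cs : List Char) (stop half : Int) : ∀ g,
    penFindEven cs stop half g =
      ((PySem.List.pyRange g stop 1).find?
        (fun x => decide (penExpandEven cs x half 0 = half))).map
        (fun x => (PySem.List.slice cs (some (x - half)) (some (x + half))).map pvSing) := by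
  have H : ∀ (fuel : Nat) (g : Int), (stop - g).toNat ≤ fuel →
      penFindEven cs stop half g =
        ((PySem.List.pyRange g stop 1).find?
          (fun x => decide (penExpandEven cs x half 0 = half))).map
          (fun x => (PySem.List.slice cs (some (x - half)) (some (x + half))).map pvSing) := by
    intro fuel
    induction fuel with
    | zero =>
      intro g hle
      rw [penFindEven, dif_neg (by omega), PySem.List.pyRange_one_eq_nil (by omega)]
      rfl
    | succ fuel ih =>
      intro g hle
      by_cases h : g < stop
      · rw [penFindEven, dif_pos h, PySem.List.pyRange_one_cons h, List.find?_cons]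
        by_cases hp : penExpandEven cs g half 0 = half
        · rw [if_pos hp, decide_eq_true hp]
          rfl
        · rw [if_neg hp, decide_eq_false hp]
          exact ih (g + 1) (by omega)
      · rw [penFindEven, dif_neg h, PySem.List.pyRange_one_eq_nil (by omega)]
        rfl
  intro g
  exact H ((stop - g).toNat) g le_rfl

-- the expansion loop reaches half iff every mirrored pair matches
theorem penExpandOdd_eq_iff (cs : List Char) (c half : Int) : ∀ r, 0 ≤ r → r ≤ half →
    (penExpandOdd cs c half r = half ↔
      ∀ t : Int, r ≤ t → t < half →
        PySem.List.pyGetD cs (c - 1 - t) ' ' = PySem.List.pyGetD cs (c + 1 + t) ' ') := by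
  have H : ∀ (fuel : Nat) (r : Int), (half - r).toNat ≤ fuel → 0 ≤ r → r ≤ half →
      (penExpandOdd cs c half r = half ↔
        ∀ t : Int, r ≤ t → t < half →
          PySem.List.pyGetD cs (c - 1 - t) ' ' = PySem.List.pyGetD cs (c + 1 + t) ' ') := by
    intro fuel
    induction fuel with
    | zero =>
      intro r hle h0 hrh
      have hrh' : r = half := by omega
      rw [penExpandOdd, dif_neg (by omega)]
      constructor
      · intro _ t ht1 ht2
        omega
      · intro _
        exact hrh'
    | succ fuel ih =>
      intro r hle h0 hrh
      by_cases heq : r = half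
      · rw [penExpandOdd, dif_neg (by omega)]
        constructor
        · intro _ t ht1 ht2
          omega
        · intro _
          exact heq
      · have hlt : r < half := by omega
        rw [penExpandOdd]
        by_cases hp : PySem.List.pyGetD cs (c - 1 - r) ' ' = PySem.List.pyGetD cs (c + 1 + r) ' '
        · rw [dif_pos ⟨hlt, hp⟩]
          rw [ih (r + 1) (by omega) (by omega) (by omega)]
          constructor
          · intro hall t ht1 ht2
            by_cases htr : t = r
            · rw [htr]; exact hp
            · exact hall t (by omega) ht2
          · intro hall t ht1 ht2
            exact hall t (by omega) ht2
        · rw [dif_neg (by intro h; exact hp h.2)]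
          constructor
          · intro h; omega
          · intro hall
            exact absurd (hall r le_rfl hlt) hp
  intro r
  exact H ((half - r).toNat) r le_rfl

theorem penExpandEven_eq_iff (cs : List Char) (g half : Int) : ∀ r, 0 ≤ r → r ≤ half →
    (penExpandEven cs g half r = half ↔
      ∀ t : Int, r ≤ t → t < half →
        PySem.List.pyGetD cs (g - 1 - t) ' ' = PySem.List.pyGetD cs (g + t) ' ') := by
  have H : ∀ (fuel : Nat) (r : Int), (half - r).toNat ≤ fuel → 0 ≤ r → r ≤ half →
      (penExpandEven cs g half r = half ↔
        ∀ t : Int, r ≤ t → t < half →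
          PySem.List.pyGetD cs (g - 1 - t) ' ' = PySem.List.pyGetD cs (g + t) ' ') := by
    intro fuel
    induction fuel with
    | zero =>
      intro r hle h0 hrh
      have hrh' : r = half := by omega
      rw [penExpandEven, dif_neg (by omega)]
      constructor
      · intro _ t ht1 ht2
        omega
      · intro _
        exact hrh'
    | succ fuel ih =>
      intro r hle h0 hrh
      by_cases heq : r = half
      · rw [penExpandEven, dif_neg (by omega)]
        constructor
        · intro _ t ht1 ht2
          omega
        · intro _
          exact heq
      · have hlt : r < half := by omega
        rw [penExpandEven]
        by_cases hp : PySem.List.pyGetD cs (g - 1 - r) ' ' = PySem.List.pyGetD cs (g + r) ' '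
        · rw [dif_pos ⟨hlt, hp⟩]
          rw [ih (r + 1) (by omega) (by omega) (by omega)]
          constructor
          · intro hall t ht1 ht2
            by_cases htr : t = r
            · rw [htr]; exact hp
            · exact hall t (by omega) ht2
          · intro hall t ht1 ht2
            exact hall t (by omega) ht2
        · rw [dif_neg (by intro h; exact hp h.2)]
          constructor
          · intro h; omega
          · intro hall
            exact absurd (hall r le_rfl hlt) hp
  intro r
  exact H ((half - r).toNat) r le_rfl

-- elements of a nonneg-bounds slice
theorem slice_getElem? {α : Type} (cs : List α) (i L : Int) (h0 : 0 ≤ i) (hL : 0 ≤ L)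
    (hle : i + L ≤ (cs.length : Int)) (j : Nat) (hj : (j : Int) < L) :
    (PySem.List.slice cs (some i) (some (i + L)))[j]? = cs[i.toNat + j]? := by
  rw [PySem.List.slice_toNat cs h0 (by omega)]
  rw [List.getElem?_take_of_lt (by omega), List.getElem?_drop]

theorem slice_length {α : Type} (cs : List α) (i L : Int) (h0 : 0 ≤ i) (hL : 0 ≤ L)
    (hle : i + L ≤ (cs.length : Int)) :
    ((PySem.List.slice cs (some i) (some (i + L))).length : Int) = L := by
  rw [PySem.List.slice_toNat cs h0 (by omega)]
  rw [List.length_take, List.length_drop]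
  omega

-- palindromicity via half the index pairs
theorem pal_iff_pairs {α : Type} (w : List α) (h : Nat) (hlen : w.length = 2 * h ∨ w.length = 2 * h + 1) :
    (w = w.reverse ↔ ∀ j : Nat, j < h → w[j]? = w[w.length - 1 - j]?) := by
  constructor
  · intro hpal j hj
    conv_lhs => rw [hpal]
    have hw : j < w.length := by omega
    rw [List.getElem?_reverse hw]
  · intro hp
    apply List.ext_getElem?
    intro j
    by_cases hw : j < w.length
    · rw [List.getElem?_reverse hw]
      by_cases hj : j < h
      · exact hp j hj
      · by_cases hj2 : w.length - 1 - j < h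
        · have := hp (w.length - 1 - j) hj2
          have hidx : w.length - 1 - (w.length - 1 - j) = j := by omega
          rw [hidx] at this
          exact this.symm
        · have hmid : w.length - 1 - j = j := by omega
          rw [hmid]
    · have h1 : w[j]? = none := by rw [List.getElem?_eq_none_iff]; omega
      have h2 : w.reverse[j]? = none := by
        rw [List.getElem?_eq_none_iff, List.length_reverse]
        omega
      rw [h1, h2]

theorem find?_congr_mem {α : Type} (l : List α) (p q : α → Bool) (h : ∀ x ∈ l, p x = q x) :
    l.find? p = l.find? q := by
  induction l with
  | nil => rfl
  | cons x t ih =>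
    rw [List.find?_cons, List.find?_cons, h x List.mem_cons_self]
    cases hq : q x
    · rw [ih (fun y hy => h y (List.mem_cons_of_mem x hy))]
    · rfl

theorem pyRange_shift (a b k : Int) :
    PySem.List.pyRange (a + k) (b + k) 1 = (PySem.List.pyRange a b 1).map (· + k) := by
  rw [PySem.List.pyRange_one, PySem.List.pyRange_one, List.map_map]
  have hd : b + k - (a + k) = b - a := by ring
  rw [hd]
  congr 1
  funext t
  simp
  ring

-- the central equivalence, odd case: window at start i is a palindrome iff all
-- mirrored pairs around center i + half match
theorem odd_pred_eq (cs : List Char) (M half i : Int) (hM : M = 2 * half + 1)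
    (hh : 0 ≤ half) (h0 : 0 ≤ i) (hle : i + M ≤ (cs.length : Int)) :
    (PySem.List.slice cs (some i) (some (i + M)) =
      (PySem.List.slice cs (some i) (some (i + M))).reverse ↔
      penExpandOdd cs (i + half) half 0 = half) := by
  have h2 : (0:Int) ≤ M := by omega
  have hlenw : (PySem.List.slice cs (some i) (some (i + M))).length = M.toNat := by
    have := slice_length cs i M h0 h2 hle
    omega
  rw [pal_iff_pairs _ half.toNat (Or.inr (by omega)),
      penExpandOdd_eq_iff cs (i + half) half 0 le_rfl hh]
  constructor
  · intro hp t ht0 hth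
    have h5 := hp (half - 1 - t).toNat (by omega)
    rw [hlenw, slice_getElem? cs i M h0 h2 hle _ (by omega),
        slice_getElem? cs i M h0 h2 hle _ (by omega)] at h5
    have e1 : i.toNat + (half - 1 - t).toNat = (i + half - 1 - t).toNat := by omega
    have e2 : i.toNat + (M.toNat - 1 - (half - 1 - t).toNat) = (i + half + 1 + t).toNat := by omega
    rw [e1, e2, List.getElem?_eq_getElem (show (i + half - 1 - t).toNat < cs.length by omega),
        List.getElem?_eq_getElem (show (i + half + 1 + t).toNat < cs.length by omega)] at h5
    rw [PySem.List.pyGetD_eq_getElem cs ' ' (by omega) (by omega),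
        PySem.List.pyGetD_eq_getElem cs ' ' (by omega) (by omega)]
    injection h5
  · intro hp j hj
    rw [hlenw, slice_getElem? cs i M h0 h2 hle j (by omega),
        slice_getElem? cs i M h0 h2 hle _ (by omega)]
    have h5 := hp ((half : Int) - 1 - j) (by omega) (by omega)
    rw [PySem.List.pyGetD_eq_getElem cs ' ' (by omega) (by omega),
        PySem.List.pyGetD_eq_getElem cs ' ' (by omega) (by omega)] at h5
    have e1 : (i + half - 1 - ((half:Int) - 1 - j)).toNat = i.toNat + j := by omega
    have e2 : (i + half + 1 + ((half:Int) - 1 - j)).toNat = i.toNat + (M.toNat - 1 - j) := by omega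
    simp only [e1, e2] at h5
    rw [List.getElem?_eq_getElem (show i.toNat + j < cs.length by omega),
        List.getElem?_eq_getElem (show i.toNat + (M.toNat - 1 - j) < cs.length by omega), h5]

-- even case
theorem even_pred_eq (cs : List Char) (M half i : Int) (hM : M = 2 * half)
    (hh : 0 ≤ half) (h0 : 0 ≤ i) (hle : i + M ≤ (cs.length : Int)) :
    (PySem.List.slice cs (some i) (some (i + M)) =
      (PySem.List.slice cs (some i) (some (i + M))).reverse ↔
      penExpandEven cs (i + half) half 0 = half) := by
  have h2 : (0:Int) ≤ M := by omega
  have hlenw : (PySem.List.slice cs (some i) (some (i + M))).length = M.toNat := by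
    have := slice_length cs i M h0 h2 hle
    omega
  rw [pal_iff_pairs _ half.toNat (Or.inl (by omega)),
      penExpandEven_eq_iff cs (i + half) half 0 le_rfl hh]
  constructor
  · intro hp t ht0 hth
    have h5 := hp (half - 1 - t).toNat (by omega)
    rw [hlenw, slice_getElem? cs i M h0 h2 hle _ (by omega),
        slice_getElem? cs i M h0 h2 hle _ (by omega)] at h5
    have e1 : i.toNat + (half - 1 - t).toNat = (i + half - 1 - t).toNat := by omega
    have e2 : i.toNat + (M.toNat - 1 - (half - 1 - t).toNat) = (i + half + t).toNat := by omega
    rw [e1, e2, List.getElem?_eq_getElem (show (i + half - 1 - t).toNat < cs.length by omega),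
        List.getElem?_eq_getElem (show (i + half + t).toNat < cs.length by omega)] at h5
    rw [PySem.List.pyGetD_eq_getElem cs ' ' (by omega) (by omega),
        PySem.List.pyGetD_eq_getElem cs ' ' (by omega) (by omega)]
    injection h5
  · intro hp j hj
    rw [hlenw, slice_getElem? cs i M h0 h2 hle j (by omega),
        slice_getElem? cs i M h0 h2 hle _ (by omega)]
    have h5 := hp ((half : Int) - 1 - j) (by omega) (by omega)
    rw [PySem.List.pyGetD_eq_getElem cs ' ' (by omega) (by omega),
        PySem.List.pyGetD_eq_getElem cs ' ' (by omega) (by omega)] at h5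
    have e1 : (i + half - 1 - ((half:Int) - 1 - j)).toNat = i.toNat + j := by omega
    have e2 : (i + half + ((half:Int) - 1 - j)).toNat = i.toNat + (M.toNat - 1 - j) := by omega
    simp only [e1, e2] at h5
    rw [List.getElem?_eq_getElem (show i.toNat + j < cs.length by omega),
        List.getElem?_eq_getElem (show i.toNat + (M.toNat - 1 - j) < cs.length by omega), h5]

-- ===== VERDICT (by name: the statement is the Claim_ definition above) =====
theorem Pen_spec : Claim_equal_Pen := by
  intro lst M _ hpre
  unfold Spec_Pen
  show Pen lst M = Pen_alt lst M
  have hpre' : (0:Int) ≤ M := hpre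
  set cs := lst.toList with hcs
  have hlen : PySem.Str.len lst = (cs.length : Int) := by
    rw [PySem.Str.len_eq]
  -- A's normal form over cs
  have hA : Pen lst M =
      ((PySem.List.pyRange 0 ((cs.length : Int) - M + 1) 1).find?
        (fun j => decide (PySem.List.slice cs (some j) (some (j + M)) =
          (PySem.List.slice cs (some j) (some (j + M))).reverse))).map
        (fun j => (PySem.List.slice cs (some j) (some (j + M))).map pvSing) := by
    rw [Pen, PenLoop_char, hlen]
    have hinj : Function.Injective (List.map pvSing) := List.map_injective_iff.mpr pvSing_inj
    have hpred : (fun j => decide (PySem.List.slice (cs.map pvSing) (some j) (some (j + M)) =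
          (PySem.List.slice (cs.map pvSing) (some j) (some (j + M))).reverse)) =
        (fun j => decide (PySem.List.slice cs (some j) (some (j + M)) =
          (PySem.List.slice cs (some j) (some (j + M))).reverse)) := by
      funext j
      apply decide_eq_decide.mpr
      rw [slice_map, ← List.map_reverse]
      exact hinj.eq_iff
    rw [hpred]
    congr 1
    funext j
    rw [slice_map]
  rw [hA, Pen_alt]
  simp only [hlen, ← hcs]
  by_cases hbig : (cs.length : Int) < M
  · rw [if_pos hbig, PySem.List.pyRange_one_eq_nil (by omega)]
    rfl
  rw [if_neg hbig]
  by_cases hM0 : M ≤ 0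
  · rw [if_pos hM0]
    have hM : M = 0 := by omega
    rw [hM, PySem.List.pyRange_one_cons (by omega), List.find?_cons]
    have h00 : PySem.List.slice cs none (some 0) = [] := by
      rw [PySem.List.slice_to cs le_rfl]
      simp
    simp [h00]
  rw [if_neg hM0]
  set half := PySem.Int.floordiv M 2 with hhalf
  have hfd : half = M / 2 := by
    rw [hhalf, PySem.Int.floordiv_eq_ediv_of_pos (by omega)]
  have hh0 : 0 ≤ half := by omega
  by_cases hodd : PySem.Int.mod M 2 ≠ 0
  · rw [if_pos hodd]
    have hmod : PySem.Int.mod M 2 = M % 2 := PySem.Int.mod_eq_emod_of_pos (by omega)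
    have hModd : M = 2 * half + 1 := by
      rw [hmod] at hodd
      omega
    rw [penFindOdd_char]
    have hrange := pyRange_shift 0 ((cs.length : Int) - M + 1) half
    rw [show (0:Int) + half = half by ring,
        show ((cs.length : Int) - M + 1) + half = (cs.length : Int) - half by omega] at hrange
    rw [hrange, List.find?_map, Option.map_map]
    have hfind : List.find? (fun x => decide (PySem.List.slice cs (some x) (some (x + M)) =
          (PySem.List.slice cs (some x) (some (x + M))).reverse))
          (PySem.List.pyRange 0 ((cs.length : Int) - M + 1) 1) =
        List.find? ((fun x => decide (penExpandOdd cs x half 0 = half)) ∘ (fun x => x + half))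
          (PySem.List.pyRange 0 ((cs.length : Int) - M + 1) 1) := by
      apply find?_congr_mem
      intro x hx
      rw [PySem.List.mem_pyRange_one] at hx
      simp only [Function.comp_apply]
      exact decide_eq_decide.mpr (odd_pred_eq cs M half x hModd hh0 (by omega) (by omega))
    rw [hfind]
    congr 1
    funext j
    simp only [Function.comp_apply]
    rw [show j + half - half = j by ring, show j + half + half + 1 = j + M by omega]
  · rw [if_neg hodd]
    have hmod : PySem.Int.mod M 2 = M % 2 := PySem.Int.mod_eq_emod_of_pos (by omega)
    have hMeven : M = 2 * half := by
      rw [not_not, hmod] at hodd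
      omega
    rw [penFindEven_char]
    have hrange := pyRange_shift 0 ((cs.length : Int) - M + 1) half
    rw [show (0:Int) + half = half by ring,
        show ((cs.length : Int) - M + 1) + half = (cs.length : Int) - half + 1 by omega] at hrange
    rw [hrange, List.find?_map, Option.map_map]
    have hfind : List.find? (fun x => decide (PySem.List.slice cs (some x) (some (x + M)) =
          (PySem.List.slice cs (some x) (some (x + M))).reverse))
          (PySem.List.pyRange 0 ((cs.length : Int) - M + 1) 1) =
        List.find? ((fun x => decide (penExpandEven cs x half 0 = half)) ∘ (fun x => x + half))
          (PySem.List.pyRange 0 ((cs.length : Int) - M + 1) 1) := by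
      apply find?_congr_mem
      intro x hx
      rw [PySem.List.mem_pyRange_one] at hx
      simp only [Function.comp_apply]
      exact decide_eq_decide.mpr (even_pred_eq cs M half x hMeven hh0 (by omega) (by omega))
    rw [hfind]
    congr 1
    funext j
    simp only [Function.comp_apply]
    rw [show j + half - half = j by ring, show j + half + half = j + M by omega]
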